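-- pv_equiv track=rewrite | github.com/liulhs/Algorithm | testAlgorithm.py | Dynam
-- ===== SOURCE A (Python) =====
-- def Dynam(n):
--     mem = [0]
--     for i in range(0,n):
--         mem.append(0)
--     for i in range(1,n+1):
--         if i <= 5:
--             mem[i] = i
--         else:
--             s = 0
--             for j in range(1,i - 4):
--                 s += (i - j)*mem[j]
--             mem[i] = s
--     return mem[n]
-- ===== SOURCE B (Python) =====
-- def Dynam(n):
--     # O(n): maintain prefix sums s1 = sum(mem[j]) and s2 = sum(j*mem[j]) over j <= i-5,
--     # so each mem[i] = i*s1 - s2 instead of an inner O(i) scan.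
--     if n <= 0:
--         return 0
--     mem = [0] * (n + 1)
--     s1 = 0
--     s2 = 0
--     for i in range(1, n + 1):
--         if i <= 5:
--             mem[i] = i
--         else:
--             v = mem[i - 5]
--             s1 += v
--             s2 += (i - 5) * v
--             mem[i] = i * s1 - s2
--     return mem[n]
-- ===== Notes on version B (the rewrite author's own statement) =====
-- stated objective: faster
-- what changed: B replaces A's O(i) inner loop (recomputing sum((i-j)*mem[j]) for every i) by two running prefix sums s1=sum(mem[j]) and s2=sum(j*mem[j]), so mem[i]=i*s1-s2 is computed in O(1) per step.
import Mathlib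
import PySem

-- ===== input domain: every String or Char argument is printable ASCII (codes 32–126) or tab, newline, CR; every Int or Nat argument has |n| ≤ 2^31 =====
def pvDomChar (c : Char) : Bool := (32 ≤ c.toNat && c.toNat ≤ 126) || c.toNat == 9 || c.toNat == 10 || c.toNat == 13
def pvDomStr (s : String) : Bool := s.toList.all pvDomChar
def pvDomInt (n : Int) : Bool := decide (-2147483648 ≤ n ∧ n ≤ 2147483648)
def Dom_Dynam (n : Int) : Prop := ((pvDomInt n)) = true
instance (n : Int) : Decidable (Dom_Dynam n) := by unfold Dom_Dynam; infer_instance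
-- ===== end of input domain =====

-- B replaces A's O(n^2) inner scan by O(n) running prefix sums (s = i*Σmem[j] - Σ j*mem[j]); objective: faster.


-- ===== PORT A =====
-- body of A's second loop (one iteration i): exact transliteration of the Python loop body;
-- indices written are always in range under Pre_, so pySetD/pyGetD are exact there
def pvStepA (m : List Int) (i : Int) : List Int :=
  if i ≤ 5 then PySem.List.pySetD m i i
  else
    let s := (PySem.List.pyRange 1 (i - 4) 1).foldl
      (fun s j => s + (i - j) * PySem.List.pyGetD m j 0) 0
    PySem.List.pySetD m i s

def Dynam (n : Int) : Int :=
  let mem : List Int := [0]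
  let mem := (PySem.List.pyRange 0 n 1).foldl (fun m (_ : Int) => m ++ [(0 : Int)]) mem
  let mem := (PySem.List.pyRange 1 (n + 1) 1).foldl pvStepA mem
  PySem.List.pyGetD mem n 0   -- mem[n]: in range whenever n ≥ -1 (Pre_)

-- ===== PORT B =====
-- body of B's loop: state (mem, s1, s2)
def pvStepB (st : List Int × Int × Int) (i : Int) : List Int × Int × Int :=
  match st with
  | (m, s1, s2) =>
    if i ≤ 5 then (PySem.List.pySetD m i i, s1, s2)
    else
      let v := PySem.List.pyGetD m (i - 5) 0
      let s1 := s1 + v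
      let s2 := s2 + (i - 5) * v
      (PySem.List.pySetD m i (i * s1 - s2), s1, s2)

def Dynam_alt (n : Int) : Int :=
  if n ≤ 0 then 0
  else
    let st := (PySem.List.pyRange 1 (n + 1) 1).foldl pvStepB
      (List.replicate (n.toNat + 1) 0, 0, 0)
    PySem.List.pyGetD st.1 n 0

-- ===== PRECONDITION & SPEC =====
-- Pre_ excludes exactly those n on which A raises IndexError (mem[n] out of range on the initial length-1 list).
def Pre_Dynam (n : Int) : Prop := -1 ≤ n
instance (n : Int) : Decidable (Pre_Dynam n) := by unfold Pre_Dynam; infer_instance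
def pvWitness_Dynam : Int := 7

def Spec_Dynam (n : Int) (out : Int) : Prop := out = Dynam_alt n
instance (n : Int) (out : Int) : Decidable (Spec_Dynam n out) := by unfold Spec_Dynam; infer_instance

-- ===== CLAIM (what is proved, stated in full; the proofs are below) =====
def Claim_equal_Dynam : Prop := ∀ (n : Int), Dom_Dynam n → Pre_Dynam n → Spec_Dynam n (Dynam n)

-- ===== LEMMAS AND PROOFS =====

-- weighted prefix sum Σ_{j=1}^{b-1} w(j)·m[j] (the invariant quantity of B's loop)
def pvS (w : Int → Int) (m : List Int) (b : Int) : Int :=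
  ((PySem.List.pyRange 1 b 1).map (fun j => w j * PySem.List.pyGetD m j 0)).sum

lemma pvS_nil (w : Int → Int) (m : List Int) (b : Int) (hb : b ≤ 1) : pvS w m b = 0 := by
  simp [pvS, PySem.List.pyRange_one_eq_nil hb]

lemma pvGetD_nonneg (m : List Int) (i : Int) (hi : 0 ≤ i) :
    PySem.List.pyGetD m i 0 = m.getD i.toNat 0 := by
  simp [PySem.List.pyGetD, PySem.List.pyGet?_of_nonneg m hi, List.getD]

lemma pvS_set (w : Int → Int) (m : List Int) (b i v : Int) (h : b ≤ i) :
    pvS w (PySem.List.pySetD m i v) b = pvS w m b := by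
  unfold pvS
  congr 1
  apply List.map_congr_left
  intro j hj
  rw [PySem.List.mem_pyRange_one] at hj
  have hj0 : (0:Int) ≤ j := by omega
  have hi0 : (0:Int) ≤ i := by omega
  rw [PySem.List.pySetD_of_nonneg m v hi0, pvGetD_nonneg _ j hj0, pvGetD_nonneg _ j hj0]
  have hne : i.toNat ≠ j.toNat := by omega
  simp [List.getD, List.getElem?_set_ne hne]

lemma pvS_succ (w : Int → Int) (m : List Int) (b : Int) (hb : 1 ≤ b) :
    pvS w m (b + 1) = pvS w m b + w b * PySem.List.pyGetD m b 0 := by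
  unfold pvS
  rw [PySem.List.pyRange_one_succ_right hb]
  simp

lemma pvSum_lin (l : List Int) (i : Int) (g : Int → Int) :
    (l.map (fun j => (i - j) * g j)).sum
      = i * (l.map (fun j => (1:Int) * g j)).sum - (l.map (fun j => j * g j)).sum := by
  induction l with
  | nil => simp
  | cons x t ih => simp [List.map_cons, List.sum_cons, ih]; ring

-- A's inner loop equals i·s1 − s2 over the same range
lemma pvInner (m : List Int) (i : Int) :
    (PySem.List.pyRange 1 (i - 4) 1).foldl
      (fun s j => s + (i - j) * PySem.List.pyGetD m j 0) 0
    = i * pvS (fun _ => 1) m (i - 4) - pvS (fun j => j) m (i - 4) := by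
  rw [PySem.List.foldl_add (g := fun j => (i - j) * PySem.List.pyGetD m j 0)]
  unfold pvS
  simpa using pvSum_lin (PySem.List.pyRange 1 (i - 4) 1) i (fun j => PySem.List.pyGetD m j 0)

-- the first loop of A builds the same zero array B starts from
lemma pvInit (n : Int) :
    (PySem.List.pyRange 0 n 1).foldl (fun m (_ : Int) => m ++ [(0 : Int)]) [0]
      = List.replicate (n.toNat + 1) 0 := by
  rw [PySem.List.foldl_append_singleton_eq_map (f := fun (_ : Int) => (0 : Int))]
  simp [List.map_const', List.replicate_succ]

-- the loop invariant: B's state after k iterations is A's array plus the two prefix sums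
lemma pvInv (m0 : List Int) (k : Nat) :
    (PySem.List.pyRange 1 ((k : Int) + 1) 1).foldl pvStepB (m0, 0, 0)
      = ((PySem.List.pyRange 1 ((k : Int) + 1) 1).foldl pvStepA m0,
         pvS (fun _ => 1) ((PySem.List.pyRange 1 ((k : Int) + 1) 1).foldl pvStepA m0) ((k : Int) - 4),
         pvS (fun j => j) ((PySem.List.pyRange 1 ((k : Int) + 1) 1).foldl pvStepA m0) ((k : Int) - 4)) := by
  induction k with
  | zero =>
    have h0 := PySem.List.pyRange_one_eq_nil (a := (1:Int)) (b := ((0:Nat):Int) + 1) (by norm_num)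
    have h1 := pvS_nil (fun _ => (1:Int)) m0 (((0:Nat):Int) - 4) (by norm_num)
    have h2 := pvS_nil (fun j => j) m0 (((0:Nat):Int) - 4) (by norm_num)
    simp only [h0, List.foldl_nil, h1, h2]
  | succ k ih =>
    have hsplit : PySem.List.pyRange 1 ((↑(k+1) : Int) + 1) 1
        = PySem.List.pyRange 1 ((k : Int) + 1) 1 ++ [(k : Int) + 1] := by
      have := PySem.List.pyRange_one_succ_right (a := 1) (b := (k : Int) + 1) (by omega)
      push_cast
      convert this using 2
    rw [hsplit, List.foldl_append, List.foldl_append, ih]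
    set A := (PySem.List.pyRange 1 ((k : Int) + 1) 1).foldl pvStepA m0 with hA
    simp only [List.foldl_cons, List.foldl_nil]
    by_cases h5 : ((k : Int) + 1) ≤ 5
    · -- early branch: both sums stay empty
      simp only [pvStepB, pvStepA, if_pos h5]
      rw [pvS_nil _ _ _ (by omega), pvS_nil _ _ _ (by omega),
          pvS_nil _ _ _ (by omega), pvS_nil _ _ _ (by omega)]
    · -- main branch
      simp only [pvStepB, pvStepA, if_neg h5]
      have hb : (1:Int) ≤ (k : Int) - 4 := by omega
      have hi : ((k : Int) - 4) ≤ (k : Int) + 1 := by omega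
      have hget : ((k : Int) + 1) - 5 = (k : Int) - 4 := by ring
      have hbnd : ((k : Int) + 1) - 4 = ((k : Int) - 4) + 1 := by ring
      have hbnd2 : (↑(k+1) : Int) - 4 = ((k : Int) - 4) + 1 := by push_cast; ring
      rw [pvInner A ((k : Int) + 1)]
      rw [hget, hbnd, hbnd2]
      rw [pvS_set _ _ _ _ _ (by omega), pvS_set _ _ _ _ _ (by omega),
          pvS_succ _ _ _ hb, pvS_succ _ _ _ hb]
      simp only [one_mul]

-- ===== VERDICT (by name: the statement is the Claim_ definition above) =====
theorem Dynam_spec : Claim_equal_Dynam := by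
  intro n _ hpre
  unfold Spec_Dynam
  unfold Pre_Dynam at hpre
  by_cases hn : n ≤ 0
  · interval_cases n <;> decide
  · obtain ⟨k, rfl⟩ : ∃ k : Nat, n = (k : Int) := ⟨n.toNat, by omega⟩
    unfold Dynam Dynam_alt
    rw [if_neg (by omega)]
    simp only
    rw [pvInit, pvInv (List.replicate (((k:Int)).toNat + 1) 0) k]
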